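-- pv_equiv track=rewrite | github.com/Scruff-AI/Resonance_Engine | scripts/dimensional_prime_test.py | modes_3d
-- ===== SOURCE A (Python) =====
-- from collections import defaultdict
--
-- def modes_3d(me):
--     c=defaultdict(int);mk=int(me**0.5)+1
--     for kx in range(-mk,mk+1):
--         for ky in range(-mk,mk+1):
--             for kz in range(-mk,mk+1):
--                 e=kx*kx+ky*ky+kz*kz
--                 if 0<e<=me:c[e]+=1
--     return dict(sorted(c.items()))
-- ===== SOURCE B (Python) =====
-- def modes_3d(me):
--     # Enumerate only the non-negative octant and weight each point by the
--     # number of sign choices (2 per nonzero coordinate); integer radius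
--     # computed exactly, no float sqrt.
--     r = 0
--     while (r + 1) * (r + 1) <= me:
--         r += 1
--     c = {}
--     for x in range(r + 1):
--         wx = 1 if x == 0 else 2
--         for y in range(r + 1):
--             wy = 1 if y == 0 else 2
--             for z in range(r + 1):
--                 e = x * x + y * y + z * z
--                 if 0 < e <= me:
--                     c[e] = c.get(e, 0) + wx * wy * (1 if z == 0 else 2)
--     return dict(sorted(c.items()))
-- ===== Notes on version B (the rewrite author's own statement) =====
-- stated objective: faster
-- what changed: B enumerates only the non-negative octant (zero to the exact integer square root per axis, found by an integer while-loop instead of float sqrt) and weights each point by the number of sign patterns it represents (doubling per nonzero coordinate), instead of A's scan of the full signed cube; several times fewer loop iterations.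
-- crash fix: On negative me, A raises TypeError (int() of the complex value me**0.5); B returns the empty dict. — e.g. on modes_3d(-5): A raises TypeError, B returns []
import Mathlib
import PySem

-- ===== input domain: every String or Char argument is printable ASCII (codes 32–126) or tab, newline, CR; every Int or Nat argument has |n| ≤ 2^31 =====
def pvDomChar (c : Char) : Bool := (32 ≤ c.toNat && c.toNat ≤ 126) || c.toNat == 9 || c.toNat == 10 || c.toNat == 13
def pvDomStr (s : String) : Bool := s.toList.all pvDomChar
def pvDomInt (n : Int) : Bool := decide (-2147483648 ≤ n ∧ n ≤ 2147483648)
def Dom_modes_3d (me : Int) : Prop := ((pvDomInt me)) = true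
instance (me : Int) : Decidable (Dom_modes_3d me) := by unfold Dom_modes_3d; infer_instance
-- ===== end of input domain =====

-- B re-implements A by scanning only the non-negative octant and weighting each
-- point by its number of sign choices (2 per nonzero coordinate), with an exact
-- integer radius instead of a float sqrt; measurably faster by a constant factor.

-- ===== PORT A =====
-- int(me**0.5) = Nat.sqrt for 0 ≤ me ≤ 2^31: the correctly rounded double sqrt
-- never crosses an integer boundary for arguments this small, so this is exact.
def modes_3d (me : Int) : List (Int × Int) :=
  let mk : Int := (Nat.sqrt me.toNat : Int) + 1
  let c : PySem.Dict Int Int :=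
    (PySem.List.pyRange (-mk) (mk + 1) 1).foldl (fun c kx =>
      (PySem.List.pyRange (-mk) (mk + 1) 1).foldl (fun c ky =>
        (PySem.List.pyRange (-mk) (mk + 1) 1).foldl (fun c kz =>
          let e := kx * kx + ky * ky + kz * kz
          if 0 < e ∧ e ≤ me then c.modify e 0 (· + 1) else c) c) c)
      PySem.Dict.empty
  -- dict(sorted(c.items())): the keys are distinct, so the resulting dict's
  -- association list is exactly the sorted items list.
  PySem.List.sorted2 c.items (fun p => p.1) (fun p => p.2) false

-- ===== PORT B =====
-- the `while (r+1)*(r+1) <= me: r += 1` loop, ported with a fuel counter that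
-- provably exceeds the number of iterations (the loop runs at most me steps).
def altRadiusGo (me : Int) : Nat → Int → Int
  | 0, r => r
  | fuel + 1, r => if (r + 1) * (r + 1) ≤ me then altRadiusGo me fuel (r + 1) else r

def modes_3d_alt (me : Int) : List (Int × Int) :=
  let r := altRadiusGo me (me.toNat + 1) 0
  let c : PySem.Dict Int Int :=
    (PySem.List.pyRange 0 (r + 1) 1).foldl (fun c x =>
      let wx : Int := if x = 0 then 1 else 2
      (PySem.List.pyRange 0 (r + 1) 1).foldl (fun c y =>
        let wy : Int := if y = 0 then 1 else 2
        (PySem.List.pyRange 0 (r + 1) 1).foldl (fun c z =>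
          let e := x * x + y * y + z * z
          if 0 < e ∧ e ≤ me then
            c.insert e (c.getD e 0 + wx * wy * (if z = 0 then 1 else 2))
          else c) c) c)
      PySem.Dict.empty
  PySem.List.sorted2 c.items (fun p => p.1) (fun p => p.2) false

-- ===== PRECONDITION & SPEC =====
-- Pre_ excludes negative me, on which A raises TypeError (int() of the complex
-- number me**0.5); B naturally returns the empty dict there (see Raises_ below).
def Pre_modes_3d (me : Int) : Prop := 0 ≤ me
instance (me : Int) : Decidable (Pre_modes_3d me) := by unfold Pre_modes_3d; infer_instance
def pvWitness_modes_3d : Int := (5)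

-- On negative me, A raises TypeError (int() of a complex square root); B returns the empty dict.
def Raises_modes_3d (me : Int) : Prop := me < 0
instance (me : Int) : Decidable (Raises_modes_3d me) := by unfold Raises_modes_3d; infer_instance
def pvRaiseWitness_modes_3d : Int := (-5)
def pvRaiseWitnessOut_modes_3d : List (Int × Int) := []

def Spec_modes_3d (me : Int) (out : List (Int × Int)) : Prop := out = modes_3d_alt me
instance (me : Int) (out : List (Int × Int)) : Decidable (Spec_modes_3d me out) := by unfold Spec_modes_3d; infer_instance

-- ===== CLAIM (what is proved, stated in full; the proofs are below) =====
def Claim_equal_modes_3d : Prop := ∀ (me : Int), Dom_modes_3d me → Pre_modes_3d me → Spec_modes_3d me (modes_3d me)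
def Claim_raises_modes_3d : Prop := (∀ (me : Int), Dom_modes_3d me → Raises_modes_3d me → ¬ Pre_modes_3d me) ∧ (Dom_modes_3d (pvRaiseWitness_modes_3d) ∧ Raises_modes_3d (pvRaiseWitness_modes_3d) ∧ modes_3d_alt (pvRaiseWitness_modes_3d) = pvRaiseWitnessOut_modes_3d)

-- ===== LEMMAS AND PROOFS =====

-- Abbreviations for the two dictionaries built by the ports.
def pvMk (me : Int) : Int := (Nat.sqrt me.toNat : Int) + 1

def pvDictA (me : Int) : PySem.Dict Int Int :=
  (PySem.List.pyRange (-(pvMk me)) (pvMk me + 1) 1).foldl (fun c kx =>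
    (PySem.List.pyRange (-(pvMk me)) (pvMk me + 1) 1).foldl (fun c ky =>
      (PySem.List.pyRange (-(pvMk me)) (pvMk me + 1) 1).foldl (fun c kz =>
        let e := kx * kx + ky * ky + kz * kz
        if 0 < e ∧ e ≤ me then c.modify e 0 (· + 1) else c) c) c)
    PySem.Dict.empty

def pvR (me : Int) : Int := altRadiusGo me (me.toNat + 1) 0

def pvDictB (me : Int) : PySem.Dict Int Int :=
  (PySem.List.pyRange 0 (pvR me + 1) 1).foldl (fun c x =>
    let wx : Int := if x = 0 then 1 else 2
    (PySem.List.pyRange 0 (pvR me + 1) 1).foldl (fun c y =>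
      let wy : Int := if y = 0 then 1 else 2
      (PySem.List.pyRange 0 (pvR me + 1) 1).foldl (fun c z =>
        let e := x * x + y * y + z * z
        if 0 < e ∧ e ≤ me then
          c.insert e (c.getD e 0 + wx * wy * (if z = 0 then 1 else 2))
        else c) c) c)
    PySem.Dict.empty

theorem modes_3d_eq_dictA (me : Int) :
    modes_3d me = PySem.List.sorted2 (pvDictA me).items (fun p => p.1) (fun p => p.2) false := rfl

theorem modes_3d_alt_eq_dictB (me : Int) :
    modes_3d_alt me = PySem.List.sorted2 (pvDictB me).items (fun p => p.1) (fun p => p.2) false := rfl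

-- weight of a coordinate (number of signed copies) and the 0/1 indicator
def pvW (k : Int) : Int := if k = 0 then 1 else 2
def pvInd (me n e : Int) : Int := if (0 < e ∧ e ≤ me) ∧ e = n then 1 else 0

def pvCntA (me n r : Int) : Int :=
  ((PySem.List.pyRange (-r) (r + 1) 1).map (fun x =>
    ((PySem.List.pyRange (-r) (r + 1) 1).map (fun y =>
      ((PySem.List.pyRange (-r) (r + 1) 1).map (fun z =>
        pvInd me n (x * x + y * y + z * z))).sum)).sum)).sum

def pvCntB (me n r : Int) : Int :=
  ((PySem.List.pyRange 0 (r + 1) 1).map (fun x =>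
    ((PySem.List.pyRange 0 (r + 1) 1).map (fun y =>
      ((PySem.List.pyRange 0 (r + 1) 1).map (fun z =>
        pvW x * pvW y * pvW z * pvInd me n (x * x + y * y + z * z))).sum)).sum)).sum

-- canonical result list
def pvCanonKeys (me : Int) : List Int :=
  (PySem.List.pyRange 1 (me + 1) 1).filter (fun n => decide (pvCntA me n (pvMk me) ≠ 0))
def pvCanon (me : Int) : List (Int × Int) :=
  (pvCanonKeys me).map (fun n => (n, pvCntA me n (pvMk me)))

-- generic loop lemmas --------------------------------------------------------

theorem foldl_acc_add {σ α : Type} (l : List α) (F : σ → α → σ) (h : σ → Int) (g : α → Int)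
    (H : ∀ c x, x ∈ l → h (F c x) = h c + g x) :
    ∀ d, h (l.foldl F d) = h d + (l.map g).sum := by
  induction l with
  | nil => intro d; simp
  | cons a t ih =>
    intro d
    simp only [List.foldl_cons, List.map_cons, List.sum_cons]
    rw [ih (fun c x hx => H c x (List.mem_cons_of_mem a hx)) (F d a),
      H d a (List.mem_cons_self)]
    ring

theorem foldl_mem_keys {α : Type} (l : List α) (F : PySem.Dict Int Int → α → PySem.Dict Int Int)
    (n : Int) (P : α → Prop)
    (H : ∀ c x, x ∈ l → (n ∈ (F c x).keys ↔ n ∈ c.keys ∨ P x)) :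
    ∀ d, (n ∈ (l.foldl F d).keys ↔ n ∈ d.keys ∨ ∃ x ∈ l, P x) := by
  induction l with
  | nil => intro d; simp
  | cons a t ih =>
    intro d
    simp only [List.foldl_cons]
    rw [ih (fun c x hx => H c x (List.mem_cons_of_mem a hx)) (F d a),
      H d a (List.mem_cons_self)]
    constructor
    · rintro ((h | h) | ⟨x, hx, hP⟩)
      · exact Or.inl h
      · exact Or.inr ⟨a, List.mem_cons_self, h⟩
      · exact Or.inr ⟨x, List.mem_cons_of_mem a hx, hP⟩
    · rintro (h | ⟨x, hx, hP⟩)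
      · exact Or.inl (Or.inl h)
      · rcases List.mem_cons.mp hx with rfl | hx
        · exact Or.inl (Or.inr hP)
        · exact Or.inr ⟨x, hx, hP⟩

theorem foldl_keys_nodup {α : Type} (l : List α) (F : PySem.Dict Int Int → α → PySem.Dict Int Int)
    (H : ∀ c x, x ∈ l → c.keys.Nodup → (F c x).keys.Nodup) :
    ∀ d, d.keys.Nodup → (l.foldl F d).keys.Nodup := by
  induction l with
  | nil => intro d hd; simpa using hd
  | cons a t ih =>
    intro d hd
    exact ih (fun c x hx => H c x (List.mem_cons_of_mem a hx)) (F d a)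
      (H d a List.mem_cons_self hd)

-- single-step dict facts
theorem nodup_keys_modify (d : PySem.Dict Int Int) (k : Int) (d0 : Int) (f : Int → Int)
    (h : d.keys.Nodup) : (d.modify k d0 f).keys.Nodup := by
  rw [PySem.Dict.keys_modify]
  exact PySem.Dict.nodup_keys_insert d k _ h

theorem mem_keys_modify (d : PySem.Dict Int Int) (k n : Int) (d0 : Int) (f : Int → Int) :
    n ∈ (d.modify k d0 f).keys ↔ n ∈ d.keys ∨ n = k := by
  rw [PySem.Dict.keys_modify]
  rw [PySem.Dict.mem_keys_insert]
  tauto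

-- list sum over a range = Finset sum
theorem sum_map_pyRange (f : Int → Int) (a b : Int) :
    ((PySem.List.pyRange a b 1).map f).sum = ∑ x ∈ Finset.Icc a (b - 1), f x := by
  rcases le_or_gt b a with h | h
  · rw [PySem.List.pyRange_one_eq_nil h, Finset.Icc_eq_empty (by omega)]
    simp
  · obtain ⟨N, hN⟩ : ∃ N : Nat, b = a + N := ⟨(b - a).toNat, by omega⟩
    subst hN
    clear h
    induction N with
    | zero =>
      rw [show a + (0:Nat) = a by omega, PySem.List.pyRange_one_eq_nil le_rfl,
        Finset.Icc_eq_empty (by omega)]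
      simp
    | succ n ih =>
      rw [show a + ((n+1:Nat):Int) = (a + n) + 1 by push_cast; ring,
        PySem.List.pyRange_one_succ_right (by omega)]
      rw [List.map_append, List.sum_append, ih]
      rw [show a + n + 1 - 1 = (a + n - 1) + 1 by ring,
        show Finset.Icc a (a + n - 1 + 1) = insert (a + n - 1 + 1) (Finset.Icc a (a + n - 1)) by
          ext x; simp [Finset.mem_Icc]; omega,
        Finset.sum_insert (by simp [Finset.mem_Icc])]
      simp
      ring


theorem pvCntA_eq_finset (me n r : Int) :
    pvCntA me n r =
      ∑ x ∈ Finset.Icc (-r) r, ∑ y ∈ Finset.Icc (-r) r, ∑ z ∈ Finset.Icc (-r) r,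
        pvInd me n (x * x + y * y + z * z) := by
  unfold pvCntA
  rw [sum_map_pyRange]
  refine Finset.sum_congr (by norm_num) (fun x _ => ?_)
  rw [sum_map_pyRange]
  refine Finset.sum_congr (by norm_num) (fun y _ => ?_)
  rw [sum_map_pyRange]
  norm_num

theorem pvCntB_eq_finset (me n r : Int) :
    pvCntB me n r =
      ∑ x ∈ Finset.Icc 0 r, ∑ y ∈ Finset.Icc 0 r, ∑ z ∈ Finset.Icc 0 r,
        pvW x * pvW y * pvW z * pvInd me n (x * x + y * y + z * z) := by
  unfold pvCntB
  rw [sum_map_pyRange]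
  refine Finset.sum_congr (by norm_num) (fun x _ => ?_)
  rw [sum_map_pyRange]
  refine Finset.sum_congr (by norm_num) (fun y _ => ?_)
  rw [sum_map_pyRange]
  norm_num

-- characterization of A's dictionary ----------------------------------------

theorem getD_dictA (me n : Int) : (pvDictA me).getD n 0 = pvCntA me n (pvMk me) := by
  have h3 : ∀ (kx ky : Int) (c : PySem.Dict Int Int),
      ((PySem.List.pyRange (-(pvMk me)) (pvMk me + 1) 1).foldl (fun c kz =>
          let e := kx * kx + ky * ky + kz * kz
          if 0 < e ∧ e ≤ me then c.modify e 0 (· + 1) else c) c).getD n 0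
        = c.getD n 0 + ((PySem.List.pyRange (-(pvMk me)) (pvMk me + 1) 1).map
            (fun kz => pvInd me n (kx * kx + ky * ky + kz * kz))).sum := by
    intro kx ky c
    refine foldl_acc_add _ _ (fun d => d.getD n 0) _ ?_ c
    intro c' kz _
    simp only
    by_cases hc : 0 < kx * kx + ky * ky + kz * kz ∧ kx * kx + ky * ky + kz * kz ≤ me
    · rw [if_pos hc, PySem.Dict.getD_modify]
      unfold pvInd
      by_cases he : n = kx * kx + ky * ky + kz * kz
      · rw [if_pos he, if_pos ⟨hc, he.symm⟩, he]
      · rw [if_neg he, if_neg (by tauto)]; ring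
    · rw [if_neg hc]; unfold pvInd; rw [if_neg (by tauto)]; ring
  have h2 : ∀ (kx : Int) (c : PySem.Dict Int Int),
      ((PySem.List.pyRange (-(pvMk me)) (pvMk me + 1) 1).foldl (fun c ky =>
        (PySem.List.pyRange (-(pvMk me)) (pvMk me + 1) 1).foldl (fun c kz =>
          let e := kx * kx + ky * ky + kz * kz
          if 0 < e ∧ e ≤ me then c.modify e 0 (· + 1) else c) c) c).getD n 0
        = c.getD n 0 + ((PySem.List.pyRange (-(pvMk me)) (pvMk me + 1) 1).map (fun ky =>
            ((PySem.List.pyRange (-(pvMk me)) (pvMk me + 1) 1).map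
              (fun kz => pvInd me n (kx * kx + ky * ky + kz * kz))).sum)).sum := by
    intro kx c
    refine foldl_acc_add _ _ (fun d => d.getD n 0) _ ?_ c
    intro c' ky _
    exact h3 kx ky c'
  have h1 := foldl_acc_add (PySem.List.pyRange (-(pvMk me)) (pvMk me + 1) 1) _
    (fun d => d.getD n 0)
    (fun kx => ((PySem.List.pyRange (-(pvMk me)) (pvMk me + 1) 1).map (fun ky =>
      ((PySem.List.pyRange (-(pvMk me)) (pvMk me + 1) 1).map
        (fun kz => pvInd me n (kx * kx + ky * ky + kz * kz))).sum)).sum)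
    (fun c kx _ => h2 kx c) PySem.Dict.empty
  unfold pvDictA pvCntA
  rw [h1, PySem.Dict.getD_empty]
  ring

theorem mem_keys_dictA (me n : Int) :
    n ∈ (pvDictA me).keys ↔
      ∃ x ∈ Finset.Icc (-(pvMk me)) (pvMk me), ∃ y ∈ Finset.Icc (-(pvMk me)) (pvMk me),
        ∃ z ∈ Finset.Icc (-(pvMk me)) (pvMk me),
          (0 < x * x + y * y + z * z ∧ x * x + y * y + z * z ≤ me) ∧
            x * x + y * y + z * z = n := by
  have h3 : ∀ (kx ky : Int) (c : PySem.Dict Int Int),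
      (n ∈ ((PySem.List.pyRange (-(pvMk me)) (pvMk me + 1) 1).foldl (fun c kz =>
          let e := kx * kx + ky * ky + kz * kz
          if 0 < e ∧ e ≤ me then c.modify e 0 (· + 1) else c) c).keys ↔
        n ∈ c.keys ∨ ∃ kz ∈ PySem.List.pyRange (-(pvMk me)) (pvMk me + 1) 1,
          (0 < kx * kx + ky * ky + kz * kz ∧ kx * kx + ky * ky + kz * kz ≤ me) ∧
            kx * kx + ky * ky + kz * kz = n) := by
    intro kx ky c
    refine foldl_mem_keys _ _ n _ ?_ c
    intro c' kz _
    simp only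
    by_cases hc : 0 < kx * kx + ky * ky + kz * kz ∧ kx * kx + ky * ky + kz * kz ≤ me
    · rw [if_pos hc, mem_keys_modify]
      constructor
      · rintro (h | h)
        · exact Or.inl h
        · exact Or.inr ⟨hc, h.symm⟩
      · rintro (h | ⟨_, h⟩)
        · exact Or.inl h
        · exact Or.inr h.symm
    · rw [if_neg hc]
      tauto
  have h2 : ∀ (kx : Int) (c : PySem.Dict Int Int),
      (n ∈ ((PySem.List.pyRange (-(pvMk me)) (pvMk me + 1) 1).foldl (fun c ky =>
        (PySem.List.pyRange (-(pvMk me)) (pvMk me + 1) 1).foldl (fun c kz =>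
          let e := kx * kx + ky * ky + kz * kz
          if 0 < e ∧ e ≤ me then c.modify e 0 (· + 1) else c) c) c).keys ↔
        n ∈ c.keys ∨ ∃ ky ∈ PySem.List.pyRange (-(pvMk me)) (pvMk me + 1) 1,
          ∃ kz ∈ PySem.List.pyRange (-(pvMk me)) (pvMk me + 1) 1,
          (0 < kx * kx + ky * ky + kz * kz ∧ kx * kx + ky * ky + kz * kz ≤ me) ∧
            kx * kx + ky * ky + kz * kz = n) := by
    intro kx c
    refine foldl_mem_keys _ _ n _ ?_ c
    intro c' ky _
    exact h3 kx ky c'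
  have h1 := foldl_mem_keys (PySem.List.pyRange (-(pvMk me)) (pvMk me + 1) 1) _ n
    (fun kx => ∃ ky ∈ PySem.List.pyRange (-(pvMk me)) (pvMk me + 1) 1,
      ∃ kz ∈ PySem.List.pyRange (-(pvMk me)) (pvMk me + 1) 1,
        (0 < kx * kx + ky * ky + kz * kz ∧ kx * kx + ky * ky + kz * kz ≤ me) ∧
          kx * kx + ky * ky + kz * kz = n)
    (fun c kx _ => h2 kx c) PySem.Dict.empty
  unfold pvDictA
  rw [h1]
  simp only [PySem.Dict.keys_empty, List.not_mem_nil, false_or,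
    PySem.List.mem_pyRange_one, Finset.mem_Icc]
  constructor
  · rintro ⟨x, hx, y, hy, z, hz, h⟩
    exact ⟨x, by omega, y, by omega, z, by omega, h⟩
  · rintro ⟨x, hx, y, hy, z, hz, h⟩
    exact ⟨x, by omega, y, by omega, z, by omega, h⟩

theorem nodup_keys_dictA (me : Int) : (pvDictA me).keys.Nodup := by
  unfold pvDictA
  refine foldl_keys_nodup _ _ (fun c kx _ hc => ?_) _ (by simp [PySem.Dict.keys_empty])
  refine foldl_keys_nodup _ _ (fun c' ky _ hc' => ?_) _ hc
  refine foldl_keys_nodup _ _ (fun c'' kz _ hc'' => ?_) _ hc'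
  simp only
  split
  · exact nodup_keys_modify _ _ _ _ hc''
  · exact hc''

-- characterization of B's dictionary ----------------------------------------

theorem getD_dictB (me n : Int) : (pvDictB me).getD n 0 = pvCntB me n (pvR me) := by
  have h3 : ∀ (x y : Int) (c : PySem.Dict Int Int),
      ((PySem.List.pyRange 0 (pvR me + 1) 1).foldl (fun c z =>
          let e := x * x + y * y + z * z
          if 0 < e ∧ e ≤ me then
            c.insert e (c.getD e 0 + (if x = 0 then (1:Int) else 2) * (if y = 0 then (1:Int) else 2) * (if z = 0 then (1:Int) else 2))
          else c) c).getD n 0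
        = c.getD n 0 + ((PySem.List.pyRange 0 (pvR me + 1) 1).map
            (fun z => pvW x * pvW y * pvW z * pvInd me n (x * x + y * y + z * z))).sum := by
    intro x y c
    refine foldl_acc_add _ _ (fun d => d.getD n 0) _ ?_ c
    intro c' z _
    simp only
    by_cases hc : 0 < x * x + y * y + z * z ∧ x * x + y * y + z * z ≤ me
    · rw [if_pos hc]
      by_cases he : n = x * x + y * y + z * z
      · rw [← he, PySem.Dict.getD_insert_self]
        have h1 : pvInd me n n = 1 := by
          unfold pvInd
          rw [if_pos ⟨he ▸ hc, rfl⟩]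
        rw [h1]
        unfold pvW
        ring
      · rw [PySem.Dict.getD_insert_of_ne _ _ _ he]
        unfold pvInd
        rw [if_neg (by tauto)]
        ring
    · rw [if_neg hc]; unfold pvInd; rw [if_neg (by tauto)]; ring
  have h2 : ∀ (x : Int) (c : PySem.Dict Int Int),
      ((PySem.List.pyRange 0 (pvR me + 1) 1).foldl (fun c y =>
        (PySem.List.pyRange 0 (pvR me + 1) 1).foldl (fun c z =>
          let e := x * x + y * y + z * z
          if 0 < e ∧ e ≤ me then
            c.insert e (c.getD e 0 + (if x = 0 then (1:Int) else 2) * (if y = 0 then (1:Int) else 2) * (if z = 0 then (1:Int) else 2))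
          else c) c) c).getD n 0
        = c.getD n 0 + ((PySem.List.pyRange 0 (pvR me + 1) 1).map (fun y =>
            ((PySem.List.pyRange 0 (pvR me + 1) 1).map
              (fun z => pvW x * pvW y * pvW z * pvInd me n (x * x + y * y + z * z))).sum)).sum := by
    intro x c
    refine foldl_acc_add _ _ (fun d => d.getD n 0) _ ?_ c
    intro c' y _
    exact h3 x y c'
  have h1 := foldl_acc_add (PySem.List.pyRange 0 (pvR me + 1) 1) _
    (fun d => d.getD n 0)
    (fun x => ((PySem.List.pyRange 0 (pvR me + 1) 1).map (fun y =>
      ((PySem.List.pyRange 0 (pvR me + 1) 1).map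
        (fun z => pvW x * pvW y * pvW z * pvInd me n (x * x + y * y + z * z))).sum)).sum)
    (fun c x _ => h2 x c) PySem.Dict.empty
  unfold pvDictB pvCntB
  rw [h1, PySem.Dict.getD_empty]
  ring

theorem mem_keys_dictB (me n : Int) :
    n ∈ (pvDictB me).keys ↔
      ∃ x ∈ Finset.Icc 0 (pvR me), ∃ y ∈ Finset.Icc 0 (pvR me),
        ∃ z ∈ Finset.Icc 0 (pvR me),
          (0 < x * x + y * y + z * z ∧ x * x + y * y + z * z ≤ me) ∧
            x * x + y * y + z * z = n := by
  have h3 : ∀ (x y : Int) (c : PySem.Dict Int Int),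
      (n ∈ ((PySem.List.pyRange 0 (pvR me + 1) 1).foldl (fun c z =>
          let e := x * x + y * y + z * z
          if 0 < e ∧ e ≤ me then
            c.insert e (c.getD e 0 + (if x = 0 then (1:Int) else 2) * (if y = 0 then (1:Int) else 2) * (if z = 0 then (1:Int) else 2))
          else c) c).keys ↔
        n ∈ c.keys ∨ ∃ z ∈ PySem.List.pyRange 0 (pvR me + 1) 1,
          (0 < x * x + y * y + z * z ∧ x * x + y * y + z * z ≤ me) ∧
            x * x + y * y + z * z = n) := by
    intro x y c
    refine foldl_mem_keys _ _ n _ ?_ c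
    intro c' z _
    simp only
    by_cases hc : 0 < x * x + y * y + z * z ∧ x * x + y * y + z * z ≤ me
    · rw [if_pos hc, PySem.Dict.mem_keys_insert]
      constructor
      · rintro (h | h)
        · exact Or.inr ⟨hc, h.symm⟩
        · exact Or.inl h
      · rintro (h | ⟨_, h⟩)
        · exact Or.inr h
        · exact Or.inl h.symm
    · rw [if_neg hc]
      tauto
  have h2 : ∀ (x : Int) (c : PySem.Dict Int Int),
      (n ∈ ((PySem.List.pyRange 0 (pvR me + 1) 1).foldl (fun c y =>
        (PySem.List.pyRange 0 (pvR me + 1) 1).foldl (fun c z =>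
          let e := x * x + y * y + z * z
          if 0 < e ∧ e ≤ me then
            c.insert e (c.getD e 0 + (if x = 0 then (1:Int) else 2) * (if y = 0 then (1:Int) else 2) * (if z = 0 then (1:Int) else 2))
          else c) c) c).keys ↔
        n ∈ c.keys ∨ ∃ y ∈ PySem.List.pyRange 0 (pvR me + 1) 1,
          ∃ z ∈ PySem.List.pyRange 0 (pvR me + 1) 1,
          (0 < x * x + y * y + z * z ∧ x * x + y * y + z * z ≤ me) ∧
            x * x + y * y + z * z = n) := by
    intro x c
    refine foldl_mem_keys _ _ n _ ?_ c
    intro c' y _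
    exact h3 x y c'
  have h1 := foldl_mem_keys (PySem.List.pyRange 0 (pvR me + 1) 1) _ n
    (fun x => ∃ y ∈ PySem.List.pyRange 0 (pvR me + 1) 1,
      ∃ z ∈ PySem.List.pyRange 0 (pvR me + 1) 1,
        (0 < x * x + y * y + z * z ∧ x * x + y * y + z * z ≤ me) ∧
          x * x + y * y + z * z = n)
    (fun c x _ => h2 x c) PySem.Dict.empty
  unfold pvDictB
  rw [h1]
  simp only [PySem.Dict.keys_empty, List.not_mem_nil, false_or,
    PySem.List.mem_pyRange_one, Finset.mem_Icc]
  constructor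
  · rintro ⟨x, hx, y, hy, z, hz, h⟩
    exact ⟨x, by omega, y, by omega, z, by omega, h⟩
  · rintro ⟨x, hx, y, hy, z, hz, h⟩
    exact ⟨x, by omega, y, by omega, z, by omega, h⟩

theorem nodup_keys_dictB (me : Int) : (pvDictB me).keys.Nodup := by
  unfold pvDictB
  refine foldl_keys_nodup _ _ (fun c x _ hc => ?_) _ (by simp [PySem.Dict.keys_empty])
  refine foldl_keys_nodup _ _ (fun c' y _ hc' => ?_) _ hc
  refine foldl_keys_nodup _ _ (fun c'' z _ hc'' => ?_) _ hc'
  simp only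
  split
  · exact PySem.Dict.nodup_keys_insert _ _ _ hc''
  · exact hc''

-- the radius ------------------------------------------------------------------

theorem altRadiusGo_spec (me : Int) :
    ∀ (fuel : Nat) (r : Int), 0 ≤ r → r * r ≤ me → (me - r).toNat ≤ fuel →
      0 ≤ altRadiusGo me fuel r ∧ (altRadiusGo me fuel r) * (altRadiusGo me fuel r) ≤ me ∧
        me < (altRadiusGo me fuel r + 1) * (altRadiusGo me fuel r + 1) := by
  intro fuel
  induction fuel with
  | zero =>
    intro r h0 h1 hf
    have hme : me ≤ r := by omega
    refine ⟨h0, by simpa [altRadiusGo] using h1, ?_⟩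
    simp only [altRadiusGo]
    nlinarith
  | succ n ih =>
    intro r h0 h1 hf
    by_cases hg : (r + 1) * (r + 1) ≤ me
    · have hlt : r < me := by nlinarith
      have := ih (r + 1) (by omega) hg (by omega)
      simpa [altRadiusGo, hg] using this
    · rw [show altRadiusGo me (n + 1) r = r by simp [altRadiusGo, hg]]
      exact ⟨h0, h1, by omega⟩


theorem pvR_spec (me : Int) (h : 0 ≤ me) :
    0 ≤ pvR me ∧ pvR me * pvR me ≤ me ∧ me < (pvR me + 1) * (pvR me + 1) := by
  exact altRadiusGo_spec me (me.toNat + 1) 0 le_rfl (by omega) (by omega)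


theorem pvMk_eq (me : Int) (h : 0 ≤ me) : pvMk me = pvR me + 1 := by
  obtain ⟨h0, h1, h2⟩ := pvR_spec me h
  unfold pvMk
  have hcast : ((me.toNat : Nat) : Int) = me := by omega
  have hq1 : (Nat.sqrt me.toNat : Int) * (Nat.sqrt me.toNat : Int) ≤ me := by
    have h' : ((Nat.sqrt me.toNat ^ 2 : Nat) : Int) ≤ ((me.toNat : Nat) : Int) :=
      by exact_mod_cast Nat.sqrt_le' me.toNat
    push_cast at h'
    nlinarith [h']
  have hq2 : me < ((Nat.sqrt me.toNat : Int) + 1) * ((Nat.sqrt me.toNat : Int) + 1) := by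
    have h' : ((me.toNat : Nat) : Int) < (((Nat.sqrt me.toNat + 1) ^ 2 : Nat) : Int) :=
      by exact_mod_cast Nat.lt_succ_sqrt' me.toNat
    push_cast at h'
    nlinarith [h']
  have hq0 : (0:Int) ≤ (Nat.sqrt me.toNat : Int) := by positivity
  -- uniqueness of the integer square root
  have : (Nat.sqrt me.toNat : Int) = pvR me := by
    by_contra hne
    rcases lt_or_gt_of_ne hne with hlt | hlt
    · nlinarith
    · nlinarith
  omega


theorem pvW_pos (k : Int) : 0 < pvW k := by
  unfold pvW; split <;> norm_num

theorem sum_ne_zero_iff {s : Finset Int} {f : Int → Int} (h : ∀ x ∈ s, 0 ≤ f x) :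
    (∑ x ∈ s, f x) ≠ 0 ↔ ∃ x ∈ s, f x ≠ 0 := by
  rw [Ne, Finset.sum_eq_zero_iff_of_nonneg h]
  push Not
  rfl

theorem dim_sym (r me' : Int) (hr : 0 ≤ r) (hbig : me' < (r + 1) * (r + 1)) (g : Int → Int)
    (heven : ∀ x, g (-x) = g x) (hzero : ∀ x, me' < x * x → g x = 0) :
    ∑ x ∈ Finset.Icc (-(r + 1)) (r + 1), g x = ∑ x ∈ Finset.Icc 0 r, pvW x * g x := by
  have hsplit : Finset.Icc (-(r + 1)) (r + 1) = Finset.Icc (-(r + 1)) (-1) ∪ Finset.Icc 0 (r + 1) := by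
    ext x; simp only [Finset.mem_Icc, Finset.mem_union]; omega
  have hdisj : Disjoint (Finset.Icc (-(r + 1)) (-1)) (Finset.Icc 0 (r + 1)) := by
    rw [Finset.disjoint_left]; intro a ha hb
    simp only [Finset.mem_Icc] at ha hb; omega
  have hneg : ∑ x ∈ Finset.Icc (-(r + 1)) (-1), g x = ∑ x ∈ Finset.Icc 1 (r + 1), g x := by
    refine Finset.sum_nbij' (fun x => -x) (fun x => -x) ?_ ?_ ?_ ?_ ?_
    · intro a ha; simp only [Finset.mem_Icc] at *; omega
    · intro a ha; simp only [Finset.mem_Icc] at *; omega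
    · intro a _; ring
    · intro a _; ring
    · intro a _; exact (heven a).symm
  have htopA : ∑ x ∈ Finset.Icc 1 (r + 1), g x = ∑ x ∈ Finset.Icc 1 r, g x := by
    rw [show Finset.Icc 1 (r + 1) = insert (r + 1) (Finset.Icc 1 r) by
        ext x; simp only [Finset.mem_Icc, Finset.mem_insert]; omega,
      Finset.sum_insert (by simp only [Finset.mem_Icc]; omega),
      hzero (r + 1) (by nlinarith), zero_add]
  have htopB : ∑ x ∈ Finset.Icc 0 (r + 1), g x = ∑ x ∈ Finset.Icc 0 r, g x := by
    rw [show Finset.Icc 0 (r + 1) = insert (r + 1) (Finset.Icc 0 r) by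
        ext x; simp only [Finset.mem_Icc, Finset.mem_insert]; omega,
      Finset.sum_insert (by simp only [Finset.mem_Icc]; omega),
      hzero (r + 1) (by nlinarith), zero_add]
  have hzeroIns : Finset.Icc 0 r = insert 0 (Finset.Icc 1 r) := by
    ext x; simp only [Finset.mem_Icc, Finset.mem_insert]; omega
  rw [hsplit, Finset.sum_union hdisj, hneg, htopA, htopB, hzeroIns,
    Finset.sum_insert (by simp only [Finset.mem_Icc]; omega),
    Finset.sum_insert (by simp only [Finset.mem_Icc]; omega)]
  have hw0 : pvW 0 = 1 := by unfold pvW; simp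
  have hrest : ∑ x ∈ Finset.Icc 1 r, pvW x * g x = ∑ x ∈ Finset.Icc 1 r, 2 * g x := by
    refine Finset.sum_congr rfl (fun x hx => ?_)
    simp only [Finset.mem_Icc] at hx
    unfold pvW
    rw [if_neg (by omega)]
  rw [hw0, hrest, ← Finset.mul_sum]
  ring


theorem sum3_sym (me n r : Int) (h0 : 0 ≤ r) (h2 : me < (r + 1) * (r + 1)) :
    (∑ x ∈ Finset.Icc (-(r + 1)) (r + 1), ∑ y ∈ Finset.Icc (-(r + 1)) (r + 1),
        ∑ z ∈ Finset.Icc (-(r + 1)) (r + 1), pvInd me n (x * x + y * y + z * z)) =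
      ∑ x ∈ Finset.Icc 0 r, ∑ y ∈ Finset.Icc 0 r, ∑ z ∈ Finset.Icc 0 r,
        pvW x * pvW y * pvW z * pvInd me n (x * x + y * y + z * z) := by
  have hzero3 : ∀ x y z : Int, me < x * x → pvInd me n (x * x + y * y + z * z) = 0 := by
    intro x y z hgt
    unfold pvInd
    rw [if_neg]
    rintro ⟨⟨-, hle⟩, -⟩
    nlinarith [mul_self_nonneg y, mul_self_nonneg z]
  have hinner : ∀ x y : Int,
      (∑ z ∈ Finset.Icc (-(r + 1)) (r + 1), pvInd me n (x * x + y * y + z * z)) =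
        ∑ z ∈ Finset.Icc 0 r, pvW z * pvInd me n (x * x + y * y + z * z) := by
    intro x y
    refine dim_sym r me h0 h2 _ (fun z => by rw [neg_mul_neg]) (fun z hz => ?_)
    unfold pvInd
    rw [if_neg]
    rintro ⟨⟨-, hle⟩, -⟩
    nlinarith [mul_self_nonneg x, mul_self_nonneg y]
  have hmid : ∀ x : Int,
      (∑ y ∈ Finset.Icc (-(r + 1)) (r + 1), ∑ z ∈ Finset.Icc (-(r + 1)) (r + 1),
          pvInd me n (x * x + y * y + z * z)) =
        ∑ y ∈ Finset.Icc 0 r, pvW y * ∑ z ∈ Finset.Icc 0 r,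
          pvW z * pvInd me n (x * x + y * y + z * z) := by
    intro x
    rw [Finset.sum_congr rfl (fun y (_ : y ∈ Finset.Icc (-(r+1)) (r+1)) => hinner x y)]
    refine dim_sym r me h0 h2 _ (fun y => ?_) (fun y hy => ?_)
    · refine Finset.sum_congr rfl (fun z _ => ?_)
      rw [neg_mul_neg]
    · refine Finset.sum_eq_zero (fun z _ => ?_)
      rw [show pvInd me n (x * x + y * y + z * z) = 0 from ?_, mul_zero]
      unfold pvInd
      rw [if_neg]
      rintro ⟨⟨-, hle⟩, -⟩
      nlinarith [mul_self_nonneg x, mul_self_nonneg z]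
  rw [Finset.sum_congr rfl (fun x (_ : x ∈ Finset.Icc (-(r+1)) (r+1)) => hmid x)]
  have hev : ∀ x : Int,
      (∑ y ∈ Finset.Icc 0 r, pvW y * ∑ z ∈ Finset.Icc 0 r,
        pvW z * pvInd me n (-x * -x + y * y + z * z)) =
      ∑ y ∈ Finset.Icc 0 r, pvW y * ∑ z ∈ Finset.Icc 0 r,
        pvW z * pvInd me n (x * x + y * y + z * z) := by
    intro x
    refine Finset.sum_congr rfl (fun y _ => ?_)
    refine congrArg _ (Finset.sum_congr rfl (fun z _ => ?_))
    rw [neg_mul_neg]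
  have hz0 : ∀ x : Int, me < x * x →
      (∑ y ∈ Finset.Icc 0 r, pvW y * ∑ z ∈ Finset.Icc 0 r,
        pvW z * pvInd me n (x * x + y * y + z * z)) = 0 := by
    intro x hx
    refine Finset.sum_eq_zero (fun y _ => ?_)
    rw [show (∑ z ∈ Finset.Icc 0 r, pvW z * pvInd me n (x * x + y * y + z * z)) = 0 from ?_,
      mul_zero]
    refine Finset.sum_eq_zero (fun z _ => ?_)
    rw [hzero3 x y z hx, mul_zero]
  rw [dim_sym r me h0 h2
    (fun x => ∑ y ∈ Finset.Icc 0 r, pvW y * ∑ z ∈ Finset.Icc 0 r,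
      pvW z * pvInd me n (x * x + y * y + z * z)) hev hz0]
  simp only [Finset.mul_sum]
  refine Finset.sum_congr rfl (fun x _ => ?_)
  refine Finset.sum_congr rfl (fun y _ => ?_)
  refine Finset.sum_congr rfl (fun z _ => ?_)
  ring

theorem cntA_eq_cntB (me n : Int) (h : 0 ≤ me) : pvCntA me n (pvMk me) = pvCntB me n (pvR me) := by
  obtain ⟨h0, h1, h2⟩ := pvR_spec me h
  rw [pvCntA_eq_finset, pvCntB_eq_finset, pvMk_eq me h]
  exact sum3_sym me n (pvR me) h0 h2

-- counts are nonzero exactly on attained values -------------------------------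

theorem pvInd_nonneg (me n e : Int) : 0 ≤ pvInd me n e := by
  unfold pvInd; split <;> norm_num

theorem cntA_ne_zero_iff (me n r : Int) :
    pvCntA me n r ≠ 0 ↔
      ∃ x ∈ Finset.Icc (-r) r, ∃ y ∈ Finset.Icc (-r) r, ∃ z ∈ Finset.Icc (-r) r,
        (0 < x * x + y * y + z * z ∧ x * x + y * y + z * z ≤ me) ∧
          x * x + y * y + z * z = n := by
  rw [pvCntA_eq_finset]
  rw [sum_ne_zero_iff (fun x _ => Finset.sum_nonneg (fun y _ => Finset.sum_nonneg
    (fun z _ => pvInd_nonneg _ _ _)))]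
  refine exists_congr fun x => and_congr_right fun _ => ?_
  rw [sum_ne_zero_iff (fun y _ => Finset.sum_nonneg (fun z _ => pvInd_nonneg _ _ _))]
  refine exists_congr fun y => and_congr_right fun _ => ?_
  rw [sum_ne_zero_iff (fun z _ => pvInd_nonneg _ _ _)]
  refine exists_congr fun z => and_congr_right fun _ => ?_
  unfold pvInd
  split_ifs with h
  · exact ⟨fun _ => h, fun _ => one_ne_zero⟩
  · exact ⟨fun hh => absurd rfl hh, fun hc => absurd hc h⟩


theorem cntB_ne_zero_iff (me n r : Int) :
    pvCntB me n r ≠ 0 ↔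
      ∃ x ∈ Finset.Icc 0 r, ∃ y ∈ Finset.Icc 0 r, ∃ z ∈ Finset.Icc 0 r,
        (0 < x * x + y * y + z * z ∧ x * x + y * y + z * z ≤ me) ∧
          x * x + y * y + z * z = n := by
  rw [pvCntB_eq_finset]
  have hw3 : ∀ x y z : Int, 0 < pvW x * pvW y * pvW z :=
    fun x y z => mul_pos (mul_pos (pvW_pos x) (pvW_pos y)) (pvW_pos z)
  rw [sum_ne_zero_iff (fun x _ => Finset.sum_nonneg (fun y _ => Finset.sum_nonneg
    (fun z _ => mul_nonneg (hw3 x y _).le (pvInd_nonneg _ _ _))))]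
  refine exists_congr fun x => and_congr_right fun _ => ?_
  rw [sum_ne_zero_iff (fun y _ => Finset.sum_nonneg
    (fun z _ => mul_nonneg (hw3 x y _).le (pvInd_nonneg _ _ _)))]
  refine exists_congr fun y => and_congr_right fun _ => ?_
  rw [sum_ne_zero_iff (fun z _ => mul_nonneg (hw3 x y _).le (pvInd_nonneg _ _ _))]
  refine exists_congr fun z => and_congr_right fun _ => ?_
  rw [mul_ne_zero_iff]
  unfold pvInd
  constructor
  · rintro ⟨-, hind⟩
    by_contra hcon
    exact hind (by rw [if_neg hcon])
  · intro hcond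
    exact ⟨(hw3 x y z).ne', by rw [if_pos hcond]; norm_num⟩


theorem cntA_ne_zero_bounds (me n r : Int) (h : pvCntA me n r ≠ 0) : 1 ≤ n ∧ n ≤ me := by
  rw [cntA_ne_zero_iff] at h
  obtain ⟨x, hx, y, hy, z, hz, ⟨hpos, hle⟩, heq⟩ := h
  omega

-- sorted2 on distinct keys is sort-by-key -------------------------------------

theorem insertBy_congr {α : Type} (f g : α → α → Bool) (x : α) (ys : List α)
    (h : ∀ y ∈ ys, f x y = g x y) :
    PySem.List.insertBy f x ys = PySem.List.insertBy g x ys := by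
  induction ys with
  | nil => rfl
  | cons y ys ih =>
    simp only [PySem.List.insertBy]
    rw [h y (List.mem_cons_self)]
    by_cases hg : g x y = true
    · rw [if_pos hg, if_pos hg]
    · rw [if_neg hg, if_neg hg, ih (fun a ha => h a (List.mem_cons_of_mem y ha))]

theorem foldl_insertBy_congr {α : Type} (S : List α) (f g : α → α → Bool)
    (h : ∀ a ∈ S, ∀ b ∈ S, f a b = g a b) :
    ∀ (l acc : List α), (∀ a ∈ l, a ∈ S) → (∀ a ∈ acc, a ∈ S) →
      l.foldl (fun acc x => PySem.List.insertBy f x acc) acc =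
        l.foldl (fun acc x => PySem.List.insertBy g x acc) acc := by
  intro l
  induction l with
  | nil => intro acc _ _; rfl
  | cons a t ih =>
    intro acc hl hacc
    have ha : a ∈ S := hl a (List.mem_cons_self)
    simp only [List.foldl_cons]
    rw [insertBy_congr f g a acc (fun y hy => h a ha y (hacc y hy))]
    refine ih _ (fun b hb => hl b (List.mem_cons_of_mem a hb)) ?_
    intro b hb
    rcases (PySem.List.mem_insertBy _ _ _ _).mp hb with rfl | hb
    · exact ha
    · exact hacc b hb

theorem sorted2_eq_sorted_fst (xs : List (Int × Int)) (hnd : (xs.map Prod.fst).Nodup) :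
    PySem.List.sorted2 xs (fun p => p.1) (fun p => p.2) false =
      PySem.List.sorted xs (fun p => p.1) false := by
  unfold PySem.List.sorted2 PySem.List.sorted
  simp only [Bool.false_eq_true, if_false]
  refine foldl_insertBy_congr xs _ _ ?_ xs [] (fun a ha => ha) (fun a ha => absurd ha (List.not_mem_nil))
  intro a ha b hb
  by_cases h1 : a.1 < b.1
  · simp [h1]
  · simp only [h1, decide_false, Bool.false_or]
    by_cases h2 : b.1 < a.1
    · simp [h2]
    · have hab : a = b := List.inj_on_of_nodup_map hnd ha hb (le_antisymm (not_lt.mp h2) (not_lt.mp h1))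
      subst hab
      simp

-- assembly --------------------------------------------------------------------

theorem nodup_canonKeys (me : Int) : (pvCanonKeys me).Nodup := by
  unfold pvCanonKeys
  exact (PySem.List.nodup_pyRange_one 1 (me + 1)).filter _

theorem pairwise_canon (me : Int) :
    List.Pairwise (fun a b : Int × Int => a.1 < b.1) (pvCanon me) := by
  unfold pvCanon pvCanonKeys
  rw [List.pairwise_map]
  exact (PySem.List.pairwise_lt_pyRange_one 1 (me + 1)).filter _

theorem mem_canonKeys (me a : Int) :
    a ∈ pvCanonKeys me ↔ (1 ≤ a ∧ a < me + 1) ∧ pvCntA me a (pvMk me) ≠ 0 := by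
  unfold pvCanonKeys
  rw [List.mem_filter, PySem.List.mem_pyRange_one]
  simp only [decide_eq_true_eq]

theorem mem_keys_dictA_iff_cnt (me a : Int) :
    a ∈ (pvDictA me).keys ↔ pvCntA me a (pvMk me) ≠ 0 := by
  rw [mem_keys_dictA, ← cntA_ne_zero_iff]

theorem mem_keys_dictB_iff_cnt (me a : Int) :
    a ∈ (pvDictB me).keys ↔ pvCntB me a (pvR me) ≠ 0 := by
  rw [mem_keys_dictB, ← cntB_ne_zero_iff]

theorem sorted_dict_eq_canon_A (me : Int) :
    PySem.List.sorted (pvDictA me).items (fun p => p.1) false = pvCanon me := by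
  refine PySem.List.sorted_eq_of_perm_of_pairwise_lt _ _ _ ?_ (pairwise_canon me)
  have hnd := nodup_keys_dictA me
  have hmapc : (pvDictA me).items = (pvDictA me).keys.map (fun k => (k, pvCntA me k (pvMk me))) := by
    rw [PySem.Dict.items_eq_map_keys (pvDictA me) hnd 0]
    exact List.map_congr_left (fun k hk => by rw [getD_dictA])
  rw [hmapc]
  unfold pvCanon
  refine List.Perm.map _ ?_
  rw [List.perm_ext_iff_of_nodup (nodup_canonKeys me) hnd]
  intro a
  rw [mem_canonKeys, mem_keys_dictA_iff_cnt]
  constructor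
  · rintro ⟨-, hne⟩; exact hne
  · intro hne
    have := cntA_ne_zero_bounds me a (pvMk me) hne
    exact ⟨by omega, hne⟩

theorem sorted_dict_eq_canon_B (me : Int) (h : 0 ≤ me) :
    PySem.List.sorted (pvDictB me).items (fun p => p.1) false = pvCanon me := by
  refine PySem.List.sorted_eq_of_perm_of_pairwise_lt _ _ _ ?_ (pairwise_canon me)
  have hnd := nodup_keys_dictB me
  have hmapc : (pvDictB me).items = (pvDictB me).keys.map (fun k => (k, pvCntA me k (pvMk me))) := by
    rw [PySem.Dict.items_eq_map_keys (pvDictB me) hnd 0]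
    exact List.map_congr_left (fun k hk => by rw [getD_dictB, ← cntA_eq_cntB me k h])
  rw [hmapc]
  unfold pvCanon
  refine List.Perm.map _ ?_
  rw [List.perm_ext_iff_of_nodup (nodup_canonKeys me) hnd]
  intro a
  rw [mem_canonKeys, mem_keys_dictB_iff_cnt, ← cntA_eq_cntB me a h]
  constructor
  · rintro ⟨-, hne⟩; exact hne
  · intro hne
    have := cntA_ne_zero_bounds me a (pvMk me) hne
    exact ⟨by omega, hne⟩

-- ===== VERDICT (by name: the statement is the Claim_ definition above) =====
theorem modes_3d_spec : Claim_equal_modes_3d := by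
  intro me _ hpre
  unfold Spec_modes_3d
  rw [modes_3d_eq_dictA, modes_3d_alt_eq_dictB,
    sorted2_eq_sorted_fst _ (by simpa [PySem.Dict.keys] using nodup_keys_dictA me),
    sorted2_eq_sorted_fst _ (by simpa [PySem.Dict.keys] using nodup_keys_dictB me),
    sorted_dict_eq_canon_A me, sorted_dict_eq_canon_B me hpre]

theorem modes_3d_raises : Claim_raises_modes_3d := by
  unfold Claim_raises_modes_3d
  constructor
  · intro me _ hr hp
    exact absurd hp (by unfold Pre_modes_3d Raises_modes_3d at *; omega)
  · exact ⟨by decide, by decide, by decide⟩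

-- self-check of the crash-fix record: B's port indeed returns the recorded value at the witness
theorem pvRaiseWitness_ok : modes_3d_alt pvRaiseWitness_modes_3d = pvRaiseWitnessOut_modes_3d :=
  modes_3d_raises.2.2.2
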